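-- pv_equiv track=rewrite | github.com/Tejaswiny-2005/codealpha_tasks | data_preprocessing.py | prepare_sequences
-- ===== SOURCE A (Python) =====
-- def prepare_sequences(notes, sequence_length=100):
--     """Prepare input and output sequences for the model."""
--     unique_notes = sorted(set(notes))
--     note_to_int = {note: number for number, note in enumerate(unique_notes)}
--
--     input_sequences = []
--     output_notes = []
--
--     for i in range(len(notes) - sequence_length):
--         input_seq = notes[i:i + sequence_length]
--         output_seq = notes[i + sequence_length]
--         input_sequences.append([note_to_int[note] for note in input_seq])
--         output_notes.append(note_to_int[output_seq])
--
--     return input_sequences, output_notes, note_to_int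
-- ===== SOURCE B (Python) =====
-- def prepare_sequences(notes, sequence_length=100):
--     """Prepare input and output sequences for the model."""
--     unique_notes = sorted(set(notes))
--     note_to_int = {note: number for number, note in enumerate(unique_notes)}
--     encoded = [note_to_int[n] for n in notes]
--     input_sequences = [encoded[i:i + sequence_length]
--                        for i in range(len(notes) - sequence_length)]
--     output_notes = encoded[sequence_length:]
--     return input_sequences, output_notes, note_to_int
-- ===== Notes on version B (the rewrite author's own statement) =====
-- stated objective: simpler
-- what changed: Encode the note list once, then build each window by slicing the pre-encoded list and take the whole output-note list as a single tail slice encoded[sequence_length:], instead of re-encoding every window element-by-element and appending outputs one at a time inside the loop.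
-- outside the precondition, e.g. on prepare_sequences(['a'], -1): A returns ([[], []], [0, 0], {'a': 0}), B returns ([[], []], [0], {'a': 0})
import Mathlib
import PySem

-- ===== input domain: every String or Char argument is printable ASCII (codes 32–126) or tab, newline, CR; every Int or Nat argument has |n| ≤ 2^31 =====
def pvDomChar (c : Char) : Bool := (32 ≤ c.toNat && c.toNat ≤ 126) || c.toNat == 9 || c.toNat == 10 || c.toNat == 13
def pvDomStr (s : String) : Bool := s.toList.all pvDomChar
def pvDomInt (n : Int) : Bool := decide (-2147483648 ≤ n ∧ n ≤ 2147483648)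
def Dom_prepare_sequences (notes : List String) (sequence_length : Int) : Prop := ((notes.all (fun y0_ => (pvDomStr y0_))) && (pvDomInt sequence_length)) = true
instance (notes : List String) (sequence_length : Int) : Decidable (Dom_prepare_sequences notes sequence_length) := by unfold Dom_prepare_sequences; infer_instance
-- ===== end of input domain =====

-- B encodes the note list once, then slices the pre-encoded list for the windows and takes the
-- output notes as one tail slice, instead of A's per-window re-encoding loop (objective: simpler).


-- ===== PORT A =====
def prepare_sequences (notes : List String) (sequence_length : Int) : List (List Int) × List Int × (List (String × Int)) :=
  let unique_notes := PySem.List.sorted (PySem.Set.ofList notes) (fun x => x) false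
  let note_to_int := (PySem.List.enumerate unique_notes 0).foldl
      (fun d p => d.insert p.2 p.1) PySem.Dict.empty
  -- the loop: two accumulators input_sequences / output_notes, appended to per i
  -- (note_to_int[note] is total here: every looked-up note comes from `notes`, so getD's default is never used;
  --  notes[i+sequence_length] is in range under Pre_, so pyGetD's default is never used)
  let st := (PySem.List.pyRange 0 (PySem.List.len notes - sequence_length) 1).foldl
      (fun (st : List (List Int) × List Int) i =>
        let input_seq := PySem.List.slice notes (some i) (some (i + sequence_length))
        let output_seq := PySem.List.pyGetD notes (i + sequence_length) ""
        (st.1 ++ [input_seq.map (fun note => note_to_int.getD note 0)],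
         st.2 ++ [note_to_int.getD output_seq 0]))
      (([] : List (List Int)), ([] : List Int))
  (st.1, st.2, note_to_int.items)

-- ===== PORT B =====
def prepare_sequences_alt (notes : List String) (sequence_length : Int) : List (List Int) × List Int × (List (String × Int)) :=
  let unique_notes := PySem.List.sorted (PySem.Set.ofList notes) (fun x => x) false
  let note_to_int := (PySem.List.enumerate unique_notes 0).foldl
      (fun d p => d.insert p.2 p.1) PySem.Dict.empty
  let encoded := notes.map (fun n => note_to_int.getD n 0)
  let input_sequences := (PySem.List.pyRange 0 (PySem.List.len notes - sequence_length) 1).map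
      (fun i => PySem.List.slice encoded (some i) (some (i + sequence_length)))
  let output_notes := PySem.List.slice encoded (some sequence_length) none
  (input_sequences, output_notes, note_to_int.items)

-- ===== PRECONDITION & SPEC =====
-- Pre_ restricts to the natural domain of nonnegative window lengths: for negative sequence_length
-- (a meaningless window size) A's output loop reads notes[i+sequence_length] through negative-index
-- wraparound (raising IndexError once sequence_length < -len(notes)), while B's tail slice returns a
-- different, equally defensible value there — see the cite in claim.json.
def Pre_prepare_sequences (_notes : List String) (sequence_length : Int) : Prop :=
  0 ≤ sequence_length
instance (notes : List String) (sequence_length : Int) : Decidable (Pre_prepare_sequences notes sequence_length) := by unfold Pre_prepare_sequences; infer_instance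
def pvWitness_prepare_sequences : List String × Int := (["c", "a", "b", "a"], 2)

def Spec_prepare_sequences (notes : List String) (sequence_length : Int) (out : List (List Int) × List Int × (List (String × Int))) : Prop := out = prepare_sequences_alt notes sequence_length
instance (notes : List String) (sequence_length : Int) (out : List (List Int) × List Int × (List (String × Int))) : Decidable (Spec_prepare_sequences notes sequence_length out) := by unfold Spec_prepare_sequences; infer_instance

-- ===== CLAIM (what is proved, stated in full; the proofs are below) =====
def Claim_equal_prepare_sequences : Prop := ∀ (notes : List String) (sequence_length : Int), Dom_prepare_sequences notes sequence_length → Pre_prepare_sequences notes sequence_length → Spec_prepare_sequences notes sequence_length (prepare_sequences notes sequence_length)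

-- ===== LEMMAS AND PROOFS =====

-- map commutes with a nonnegative-bounds slice (A re-encodes the sliced window; B slices the encoded list)
theorem slice_map_comm {α β : Type} (f : α → β) (xs : List α) (a b : Int)
    (ha : 0 ≤ a) (hb : 0 ≤ b) :
    (PySem.List.slice xs (some a) (some b)).map f
      = PySem.List.slice (xs.map f) (some a) (some b) := by
  rw [PySem.List.slice_toNat xs ha hb, PySem.List.slice_toNat (xs.map f) ha hb]
  simp [List.map_take, List.map_drop]

-- A's output loop, as a map over the index range, is the tail of the encoded list (B's single slice)
theorem map_f_pyGetD_shift {α β : Type} (f : α → β) (xs : List α) (m : Nat) (d : α) :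
    (PySem.List.pyRange 0 ((xs.length : Int) - (m : Int)) 1).map
        (fun i => f (PySem.List.pyGetD xs (i + (m : Int)) d))
      = (xs.map f).drop m := by
  rw [PySem.List.pyRange_one, List.map_map]
  apply List.ext_getElem
  · simp
  · intro k h1 h2
    simp only [List.getElem_map, List.getElem_range, Function.comp_apply]
    have hk : k < xs.length - m := by simp at h2; omega
    have hc : (0 : Int) + (k : Int) + (m : Int) = ((m + k : Nat) : Int) := by push_cast; ring
    rw [hc, PySem.List.pyGetD_natCast, List.getElem_drop, List.getElem_map,
        List.getD_eq_getElem _ _ (by omega)]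

theorem prepare_sequences_spec : Claim_equal_prepare_sequences := by
  intro notes sl _ hpre
  unfold Spec_prepare_sequences
  obtain ⟨m, rfl⟩ : ∃ m : Nat, sl = (m : Int) :=
    ⟨sl.toNat, (Int.toNat_of_nonneg hpre).symm⟩
  unfold prepare_sequences prepare_sequences_alt
  simp only [PySem.List.len_eq]
  set d := (PySem.List.enumerate (PySem.List.sorted (PySem.Set.ofList notes) (fun x => x) false) 0).foldl (fun d p => d.insert p.2 p.1) PySem.Dict.empty with hd
  rw [PySem.List.foldl_prod_mk
      (f := fun acc i => acc ++ [(PySem.List.slice notes (some i) (some (i + (m:Int)))).map (fun note => d.getD note 0)])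
      (g := fun acc i => acc ++ [d.getD (PySem.List.pyGetD notes (i + (m:Int)) "") 0])]
  rw [PySem.List.foldl_append_singleton_eq_map, PySem.List.foldl_append_singleton_eq_map]
  refine congrArg₂ Prod.mk ?_ (congrArg₂ Prod.mk ?_ rfl)
  · simp only [List.nil_append]
    apply List.map_congr_left
    intro i hi
    have h0 : 0 ≤ i := (PySem.List.mem_pyRange_one.mp hi).1
    exact slice_map_comm _ notes i (i + m) h0 (by omega)
  · simp only [List.nil_append]
    rw [PySem.List.slice_from _ (by positivity), Int.toNat_natCast]
    exact map_f_pyGetD_shift (fun s => d.getD s 0) notes m ""
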